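-- pv_equiv track=rewrite | github.com/TrashDeviance/Wireshark-Network-Capture | capture_traffic_functions.py | only_grab_specific_attributes
-- ===== SOURCE A (Python) =====
-- def only_grab_specific_attributes(attribute_dict: dict, search_for_iterable: list|tuple|set) -> dict:
--     """
--     Allows the functionality to choose specific attributes from the dict instead of all of them.
--
--     Parameters:
--     - `attribute_dict` (dict): The dict that contains the attribute values.
--     - `search_for_iterable`: An interable that contains the attribute values from the dict to only grab from.
--
--     Returns:
--     - A dict that contains the subset values of the original dict.
--     """
--     subset_dict = dict()
--     for index, (packet_data) in enumerate(attribute_dict.values(), start=1):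
--         new_packet_num = f'Packet {index}'
--         subset_dict[new_packet_num] = {}
--         for layer_name, layer_value in packet_data.items():
--             if layer_value is not None:
--                 filtered_values = {key: value for key, value in layer_value.items() if key in search_for_iterable}
--                 if filtered_values:
--                     subset_dict[new_packet_num][layer_name] = filtered_values
--     return subset_dict
-- ===== SOURCE B (Python) =====
-- def only_grab_specific_attributes(attribute_dict: dict, search_for_iterable) -> dict:
--     """Stream-and-group re-implementation: flatten each packet into a stream of
--     (layer, key, value) triples restricted to the wanted attributes, then let the
--     layer sub-dicts emerge by setdefault-grouping -- no per-layer filtered dict is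
--     built and no emptiness test is needed."""
--     wanted = set(search_for_iterable)
--
--     def wanted_triples(packet_data):
--         for layer_name, layer_value in packet_data.items():
--             if layer_value is not None:
--                 for key, value in layer_value.items():
--                     if key in wanted:
--                         yield layer_name, key, value
--
--     def group(triples):
--         entry = {}
--         for layer_name, key, value in triples:
--             entry.setdefault(layer_name, {})[key] = value
--         return entry
--
--     return {f'Packet {index}': group(wanted_triples(packet_data))
--             for index, packet_data in enumerate(attribute_dict.values(), start=1)}
-- ===== Notes on version B (the rewrite author's own statement) =====
-- stated objective: faster
-- what changed: Instead of building a filtered dict per layer and testing it for emptiness, B flattens each packet into a stream of wanted (layer, key, value) triples (driven by a precomputed set of wanted attributes) and regroups the stream into the nested result with setdefault, so no per-layer dict construction or emptiness guard exists.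
import Mathlib
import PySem

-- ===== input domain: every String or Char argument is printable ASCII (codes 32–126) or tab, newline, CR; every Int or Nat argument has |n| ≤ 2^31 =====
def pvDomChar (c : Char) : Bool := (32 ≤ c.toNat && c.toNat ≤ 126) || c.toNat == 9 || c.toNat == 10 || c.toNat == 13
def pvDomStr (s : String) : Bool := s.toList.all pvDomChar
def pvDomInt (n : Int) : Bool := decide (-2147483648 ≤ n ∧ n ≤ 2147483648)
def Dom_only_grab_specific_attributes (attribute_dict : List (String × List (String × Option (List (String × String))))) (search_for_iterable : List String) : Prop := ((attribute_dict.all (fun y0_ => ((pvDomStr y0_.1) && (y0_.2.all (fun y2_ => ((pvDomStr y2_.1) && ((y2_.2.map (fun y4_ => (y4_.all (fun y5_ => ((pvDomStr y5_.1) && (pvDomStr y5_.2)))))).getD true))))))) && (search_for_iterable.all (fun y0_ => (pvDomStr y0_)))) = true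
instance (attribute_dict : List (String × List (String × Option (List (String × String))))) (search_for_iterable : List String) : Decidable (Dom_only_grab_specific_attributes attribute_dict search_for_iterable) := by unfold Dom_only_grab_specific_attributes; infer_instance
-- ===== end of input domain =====

-- B replaces A's per-layer filtered-dict construction and emptiness guard by flattening each
-- packet into a stream of wanted (layer, key, value) triples and regrouping them with
-- setdefault (alternative decomposition; same values, same order).


-- ===== PORT A =====
-- Nested dicts are modelled with PySem.Dict; pvItemsDeep is the fixed representation
-- conversion from the nested-Dict result back to the association-list output type.
def pvItemsDeep (d : PySem.Dict String (PySem.Dict String (PySem.Dict String String))) : List (String × List (String × List (String × String))) :=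
  d.items.map (fun p => (p.1, p.2.items.map (fun q => (q.1, q.2.items))))

def only_grab_specific_attributes (attribute_dict : List (String × List (String × Option (List (String × String))))) (search_for_iterable : List String) : List (String × List (String × List (String × String))) :=
  let subset_dict :=
    (PySem.List.enumerate (PySem.Dict.ofList attribute_dict).values 1).foldl
      (fun subset_dict ip =>
        let new_packet_num := "Packet " ++ PySem.Int.toStr ip.1
        let subset_dict := subset_dict.insert new_packet_num PySem.Dict.empty
        (PySem.Dict.ofList ip.2).items.foldl
          (fun s lp =>
            match lp.2 with
            | none => s
            | some layer_value =>
              let filtered_values :=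
                (PySem.Dict.ofList layer_value).items.foldl
                  (fun fd kv => if search_for_iterable.contains kv.1 then fd.insert kv.1 kv.2 else fd)
                  PySem.Dict.empty
              if filtered_values.size ≠ 0 then
                s.modify new_packet_num PySem.Dict.empty (fun inner => inner.insert lp.1 filtered_values)
              else s)
          subset_dict)
      PySem.Dict.empty
  pvItemsDeep subset_dict

-- ===== PORT B =====
-- the generator wanted_triples: flatten one packet into its wanted (layer, key, value) triples
def pvWantedTriples (wanted : PySem.Set String) (packet_data : List (String × Option (List (String × String)))) : List (String × String × String) :=
  (PySem.Dict.ofList packet_data).items.flatMap (fun lp =>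
    match lp.2 with
    | none => []
    | some layer_value =>
      ((PySem.Dict.ofList layer_value).items.filter (fun kv => wanted.contains kv.1)).map
        (fun kv => (lp.1, kv.1, kv.2)))

-- group: entry.setdefault(layer_name, {})[key] = value is exactly
-- modify layer_name {} (·.insert key value) (insert into the present sub-dict, else a fresh one)
def pvGroup (ts : List (String × String × String)) : PySem.Dict String (PySem.Dict String String) :=
  ts.foldl (fun entry t => entry.modify t.1 PySem.Dict.empty (fun l => l.insert t.2.1 t.2.2)) PySem.Dict.empty

def only_grab_specific_attributes_alt (attribute_dict : List (String × List (String × Option (List (String × String))))) (search_for_iterable : List String) : List (String × List (String × List (String × String))) :=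
  let wanted := PySem.Set.ofList search_for_iterable
  pvItemsDeep (PySem.Dict.ofList
    ((PySem.List.enumerate (PySem.Dict.ofList attribute_dict).values 1).map (fun ip =>
      ("Packet " ++ PySem.Int.toStr ip.1, pvGroup (pvWantedTriples wanted ip.2)))))

-- ===== PRECONDITION & SPEC =====
def Spec_only_grab_specific_attributes (attribute_dict : List (String × List (String × Option (List (String × String))))) (search_for_iterable : List String) (out : List (String × List (String × List (String × String)))) : Prop := out = only_grab_specific_attributes_alt attribute_dict search_for_iterable
instance (attribute_dict : List (String × List (String × Option (List (String × String))))) (search_for_iterable : List String) (out : List (String × List (String × List (String × String)))) : Decidable (Spec_only_grab_specific_attributes attribute_dict search_for_iterable out) := by unfold Spec_only_grab_specific_attributes; infer_instance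

-- ===== CLAIM (what is proved, stated in full; the proofs are below) =====
def Claim_equal_only_grab_specific_attributes : Prop := ∀ (attribute_dict : List (String × List (String × Option (List (String × String))))) (search_for_iterable : List String), Dom_only_grab_specific_attributes attribute_dict search_for_iterable → Spec_only_grab_specific_attributes attribute_dict search_for_iterable (only_grab_specific_attributes attribute_dict search_for_iterable)

-- ===== LEMMAS AND PROOFS =====

-- proof-side abbreviation for the trimmed sub-dict of one layer
def pvTrim (wanted : PySem.Set String) (layer_value : List (String × String)) : PySem.Dict String String :=
  PySem.Dict.ofList ((PySem.Dict.ofList layer_value).items.filter (fun kv => wanted.contains kv.1))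

-- membership in the precomputed set equals membership in the original list
theorem pv_contains_ofList (sf : List String) (x : String) :
    (PySem.Set.ofList sf).contains x = sf.contains x := by
  simp only [PySem.Set.contains]
  rw [Bool.eq_iff_iff]
  simp [PySem.Set.mem_ofList]

-- A's innermost filtering fold builds exactly the trimmed dict
theorem pv_filt (sf : List String) (L : List (String × String)) :
    L.foldl (fun fd kv => if sf.contains kv.1 then fd.insert kv.1 kv.2 else fd)
      PySem.Dict.empty
    = PySem.Dict.ofList (L.filter (fun kv => (PySem.Set.ofList sf).contains kv.1)) := by
  have h : PySem.Dict.ofList (L.filter (fun kv => (PySem.Set.ofList sf).contains kv.1))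
      = (L.filter (fun kv => (PySem.Set.ofList sf).contains kv.1)).foldl
          (fun fd (kv : String × String) => fd.insert kv.1 kv.2) PySem.Dict.empty := rfl
  rw [h, List.foldl_filter]
  simp only [pv_contains_ofList]

-- A's inner layer step, with the filtering fold replaced by pvTrim
theorem pv_stepA_eq (sf : List String) (key : String) :
    (fun (s : PySem.Dict String (PySem.Dict String (PySem.Dict String String)))
         (lp : String × Option (List (String × String))) =>
      match lp.2 with
      | none => s
      | some layer_value =>
        let filtered_values :=
          (PySem.Dict.ofList layer_value).items.foldl
            (fun fd kv => if sf.contains kv.1 then fd.insert kv.1 kv.2 else fd)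
            PySem.Dict.empty
        if filtered_values.size ≠ 0 then
          s.modify key PySem.Dict.empty (fun inner => inner.insert lp.1 filtered_values)
        else s)
    = (fun s lp =>
      match lp.2 with
      | none => s
      | some layer_value =>
        let trimmed := pvTrim (PySem.Set.ofList sf) layer_value
        if trimmed.size ≠ 0 then
          s.modify key PySem.Dict.empty (fun inner => inner.insert lp.1 trimmed)
        else s) := by
  funext s lp
  obtain ⟨ln, lv⟩ := lp
  cases lv with
  | none => rfl
  | some layer_value => simp only [pv_filt, pvTrim]

-- the middle loop: starting from s with key just (re)inserted, all the in-place
-- modifications at key amount to building the inner dict aside and inserting it once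
theorem pv_mid (W : PySem.Set String) (key : String)
    (L : List (String × Option (List (String × String)))) :
    ∀ (s : PySem.Dict String (PySem.Dict String (PySem.Dict String String)))
      (cur : PySem.Dict String (PySem.Dict String String)),
    L.foldl (fun s lp =>
        match lp.2 with
        | none => s
        | some layer_value =>
          let trimmed := pvTrim W layer_value
          if trimmed.size ≠ 0 then
            s.modify key PySem.Dict.empty (fun inner => inner.insert lp.1 trimmed)
          else s)
      (s.insert key cur)
    = s.insert key (L.foldl (fun cur lp =>
        match lp.2 with
        | none => cur
        | some layer_value =>
          let trimmed := pvTrim W layer_value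
          if trimmed.size ≠ 0 then cur.insert lp.1 trimmed else cur) cur) := by
  induction L with
  | nil => intro s cur; rfl
  | cons lp L ih =>
    intro s cur
    obtain ⟨ln, lv⟩ := lp
    cases lv with
    | none =>
      simp only [List.foldl_cons]
      exact ih s cur
    | some layer_value =>
      simp only [List.foldl_cons]
      by_cases h : (pvTrim W layer_value).size ≠ 0
      · simp only [ne_eq, h, not_false_eq_true, if_pos]
        rw [show ((s.insert key cur).modify key PySem.Dict.empty
              (fun inner => inner.insert ln (pvTrim W layer_value)))
            = s.insert key (cur.insert ln (pvTrim W layer_value)) from by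
          simp [PySem.Dict.modify, PySem.Dict.getD_insert_self, PySem.Dict.insert_insert_self]]
        exact ih s _
      · simp only [ne_eq, not_not] at h
        simp only [ne_eq, h, not_true_eq_false, if_false]
        exact ih s cur

-- the aside-built inner loop, as a filterMap comprehension
theorem pv_filterMap (W : PySem.Set String)
    (L : List (String × Option (List (String × String)))) :
    ∀ (cur : PySem.Dict String (PySem.Dict String String)),
    L.foldl (fun cur lp =>
        match lp.2 with
        | none => cur
        | some layer_value =>
          let trimmed := pvTrim W layer_value
          if trimmed.size ≠ 0 then cur.insert lp.1 trimmed else cur) cur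
    = cur.update (L.filterMap (fun lp =>
        match lp.2 with
        | none => none
        | some layer_value =>
          let trimmed := pvTrim W layer_value
          if trimmed.size ≠ 0 then some (lp.1, trimmed) else none)) := by
  induction L with
  | nil => intro cur; rfl
  | cons lp L ih =>
    intro cur
    obtain ⟨ln, lv⟩ := lp
    cases lv with
    | none =>
      simp only [List.foldl_cons, List.filterMap_cons]
      exact ih cur
    | some layer_value =>
      simp only [List.foldl_cons, List.filterMap_cons]
      by_cases h : (pvTrim W layer_value).size ≠ 0
      · simp only [ne_eq, h, not_false_eq_true, if_pos]
        rw [ih ((cur.insert ln (pvTrim W layer_value)))]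
        rfl
      · simp only [ne_eq, not_not] at h
        simp only [ne_eq, h, not_true_eq_false, if_false]
        exact ih cur

-- the whole outer loop of A, as one insert per packet of the aside-built inner dict
theorem pv_outer (sf : List String)
    (E : List (Int × List (String × Option (List (String × String))))) :
    ∀ (s : PySem.Dict String (PySem.Dict String (PySem.Dict String String))),
    E.foldl (fun subset_dict ip =>
        (PySem.Dict.ofList ip.2).items.foldl
          (fun s lp =>
            match lp.2 with
            | none => s
            | some layer_value =>
              let filtered_values :=
                (PySem.Dict.ofList layer_value).items.foldl
                  (fun fd kv => if sf.contains kv.1 then fd.insert kv.1 kv.2 else fd)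
                  PySem.Dict.empty
              if filtered_values.size ≠ 0 then
                s.modify ("Packet " ++ PySem.Int.toStr ip.1) PySem.Dict.empty
                  (fun inner => inner.insert lp.1 filtered_values)
              else s)
          (subset_dict.insert ("Packet " ++ PySem.Int.toStr ip.1) PySem.Dict.empty)) s
    = E.foldl (fun s ip =>
        s.insert ("Packet " ++ PySem.Int.toStr ip.1)
          (PySem.Dict.ofList ((PySem.Dict.ofList ip.2).items.filterMap (fun lp =>
            match lp.2 with
            | none => none
            | some layer_value =>
              let trimmed := pvTrim (PySem.Set.ofList sf) layer_value
              if trimmed.size ≠ 0 then some (lp.1, trimmed) else none)))) s := by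
  induction E with
  | nil => intro s; rfl
  | cons ip E ih =>
    intro s
    simp only [List.foldl_cons]
    rw [pv_stepA_eq sf ("Packet " ++ PySem.Int.toStr ip.1)]
    rw [pv_mid (PySem.Set.ofList sf) ("Packet " ++ PySem.Int.toStr ip.1)
        (PySem.Dict.ofList ip.2).items s PySem.Dict.empty]
    rw [pv_filterMap (PySem.Set.ofList sf) (PySem.Dict.ofList ip.2).items PySem.Dict.empty]
    exact ih _

-- ofList of a list with distinct keys lists exactly those pairs
theorem pv_items_ofList (P : List (String × String)) (h : (P.map (·.1)).Nodup) :
    (PySem.Dict.ofList P).items = P := by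
  have := PySem.Dict.items_foldl_insert_fresh (l := P) (k := (·.1)) (v := (·.2))
    (d := PySem.Dict.empty) (by simp) (by simpa using h)
  simpa [PySem.Dict.ofList] using this

-- grouping the triples of one layer, once its name is present, fills that entry in place
theorem pv_fill_one (lname : String) (P : List (String × String)) :
    ∀ (e : PySem.Dict String (PySem.Dict String String)) (d0 : PySem.Dict String String),
    (P.map (fun kv => (lname, kv.1, kv.2))).foldl
      (fun entry t => entry.modify t.1 PySem.Dict.empty (fun l => l.insert t.2.1 t.2.2))
      (e.insert lname d0)
    = e.insert lname (P.foldl (fun d kv => d.insert kv.1 kv.2) d0) := by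
  induction P with
  | nil => intro e d0; rfl
  | cons kv P ih =>
    intro e d0
    simp only [List.map_cons, List.foldl_cons]
    rw [show ((e.insert lname d0).modify lname PySem.Dict.empty
          (fun l => l.insert kv.1 kv.2)) = e.insert lname (d0.insert kv.1 kv.2) from by
      simp [PySem.Dict.modify, PySem.Dict.getD_insert_self, PySem.Dict.insert_insert_self]]
    exact ih e _

-- grouping the triples of one fresh layer name either does nothing or inserts its dict once
theorem pv_group_layer (lname : String) (P : List (String × String))
    (e : PySem.Dict String (PySem.Dict String String)) (he : e.contains lname = false) :
    (P.map (fun kv => (lname, kv.1, kv.2))).foldl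
      (fun entry t => entry.modify t.1 PySem.Dict.empty (fun l => l.insert t.2.1 t.2.2)) e
    = if P.isEmpty then e else e.insert lname (PySem.Dict.ofList P) := by
  cases P with
  | nil => rfl
  | cons kv P =>
    simp only [List.map_cons, List.foldl_cons, List.isEmpty_cons, if_neg Bool.false_ne_true]
    rw [show (e.modify lname PySem.Dict.empty (fun l => l.insert kv.1 kv.2))
        = e.insert lname (PySem.Dict.empty.insert kv.1 kv.2) from by
      simp [PySem.Dict.modify, PySem.Dict.getD_of_not_contains e PySem.Dict.empty he]]
    rw [pv_fill_one]
    rfl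

-- grouping a packet's flattened triple stream equals the aside-built per-layer fold
theorem pv_group_eq (W : PySem.Set String) :
    ∀ (L : List (String × Option (List (String × String))))
      (e : PySem.Dict String (PySem.Dict String String)),
    (L.map (·.1)).Nodup →
    (∀ l ∈ L.map (·.1), e.contains l = false) →
    (L.flatMap (fun lp =>
        match lp.2 with
        | none => []
        | some layer_value =>
          ((PySem.Dict.ofList layer_value).items.filter (fun kv => W.contains kv.1)).map
            (fun kv => (lp.1, kv.1, kv.2)))).foldl
      (fun entry t => entry.modify t.1 PySem.Dict.empty (fun l => l.insert t.2.1 t.2.2)) e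
    = L.foldl (fun cur lp =>
        match lp.2 with
        | none => cur
        | some layer_value =>
          let trimmed := pvTrim W layer_value
          if trimmed.size ≠ 0 then cur.insert lp.1 trimmed else cur) e := by
  intro L
  induction L with
  | nil => intro e _ _; rfl
  | cons lp L ih =>
    intro e hnd he
    obtain ⟨ln, lv⟩ := lp
    simp only [List.map_cons, List.nodup_cons] at hnd
    have heln : e.contains ln = false := he ln (by simp)
    cases lv with
    | none =>
      simp only [List.flatMap_cons, List.nil_append, List.foldl_cons]
      exact ih e hnd.2 (fun l hl => he l (by simp [hl]))
    | some layer_value =>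
      simp only [List.flatMap_cons, List.foldl_append, List.foldl_cons]
      set P := (PySem.Dict.ofList layer_value).items.filter (fun kv => W.contains kv.1) with hP
      have hPnd : (P.map (·.1)).Nodup := by
        have hkeys : ((PySem.Dict.ofList layer_value).items.map (·.1)).Nodup := by
          have := PySem.Dict.nodup_keys_ofList (ps := layer_value)
          simpa [PySem.Dict.keys] using this
        exact hkeys.sublist (List.Sublist.map _ (List.filter_sublist))
      have hsize : (pvTrim W layer_value).size = P.length := by
        simp only [pvTrim, PySem.Dict.size, ← hP, pv_items_ofList P hPnd]
      rw [pv_group_layer ln P e heln]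
      by_cases hemp : P.isEmpty
      · have hlen : P.length = 0 := by simpa [List.isEmpty_iff_length_eq_zero] using hemp
        simp only [hemp, if_true, ne_eq, hsize, hlen, not_true_eq_false, if_false]
        exact ih e hnd.2 (fun l hl => he l (by simp [hl]))
      · have hlen : P.length ≠ 0 := by
          simpa [List.isEmpty_iff_length_eq_zero] using hemp
        simp only [hemp, ne_eq, hsize, hlen, not_false_eq_true, if_true, Bool.false_eq_true, if_false]
        refine ih (e.insert ln (PySem.Dict.ofList P)) hnd.2 ?_
        intro l hl
        rw [PySem.Dict.contains_insert]
        have hne : l ≠ ln := fun h => hnd.1 (h ▸ hl)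
        simp [hne, he l (by simp [hl])]

-- per packet: B's stream-and-group dict is the aside-built filterMap dict
theorem pv_packet_eq (W : PySem.Set String)
    (packet : List (String × Option (List (String × String)))) :
    pvGroup (pvWantedTriples W packet)
    = PySem.Dict.ofList ((PySem.Dict.ofList packet).items.filterMap (fun lp =>
        match lp.2 with
        | none => none
        | some layer_value =>
          let trimmed := pvTrim W layer_value
          if trimmed.size ≠ 0 then some (lp.1, trimmed) else none)) := by
  have hnd : ((PySem.Dict.ofList packet).items.map (·.1)).Nodup := by
    have := PySem.Dict.nodup_keys_ofList (ps := packet)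
    simpa [PySem.Dict.keys] using this
  rw [pvGroup, pvWantedTriples,
    pv_group_eq W (PySem.Dict.ofList packet).items PySem.Dict.empty hnd (fun _ _ => by simp),
    pv_filterMap W (PySem.Dict.ofList packet).items PySem.Dict.empty]
  rfl

-- ===== VERDICT (by name: the statement is the Claim_ definition above) =====
theorem only_grab_specific_attributes_spec : Claim_equal_only_grab_specific_attributes := by
  intro attribute_dict search_for_iterable _
  unfold Spec_only_grab_specific_attributes
  simp only [only_grab_specific_attributes, only_grab_specific_attributes_alt]
  congr 1
  rw [pv_outer search_for_iterable
      (PySem.List.enumerate (PySem.Dict.ofList attribute_dict).values 1) PySem.Dict.empty]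
  have hof : PySem.Dict.ofList
      ((PySem.List.enumerate (PySem.Dict.ofList attribute_dict).values 1).map (fun ip =>
        ("Packet " ++ PySem.Int.toStr ip.1,
          pvGroup (pvWantedTriples (PySem.Set.ofList search_for_iterable) ip.2))))
    = ((PySem.List.enumerate (PySem.Dict.ofList attribute_dict).values 1).map (fun ip =>
        ("Packet " ++ PySem.Int.toStr ip.1,
          pvGroup (pvWantedTriples (PySem.Set.ofList search_for_iterable) ip.2)))).foldl
        (fun (d : PySem.Dict String (PySem.Dict String (PySem.Dict String String))) p =>
          d.insert p.1 p.2) PySem.Dict.empty := rfl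
  rw [hof, List.foldl_map]
  simp only [pv_packet_eq]
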